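-- pv_equiv track=rewrite | github.com/juissi-t/in-game-messages | in_game_messages/slack_messaging.py | icon_from_name
-- ===== SOURCE A (Python) =====
-- def icon_from_name(name: str) -> str:
--     """Return an icon URL from in-game name."""
--     base_url = "https://mobile.planets.nu/img/"
--     races = {
--         "The Feds": 1,
--         "The Lizards": 2,
--         "The Bird Men": 3,
--         "The Fascists": 4,
--         "The Privateers": 5,
--         "The Cyborg": 6,
--         "The Crystals": 7,
--         "The Evil Empire": 8,
--         "The Robots": 9,
--         "The Rebels": 10,
--         "The Colonies": 11,
--         "The Horwasp": 12,
--     }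
--
--     for race_name, race_id in races.items():
--         if name.endswith(f"({race_name})"):
--             return f"{base_url}races/race-{str(race_id)}.jpg"
--
--     return f"{base_url}ui/league-logo-400-drop.png"
-- ===== SOURCE B (Python) =====
-- def icon_from_name(name: str) -> str:
--     """Return an icon URL from in-game name."""
--     base_url = "https://mobile.planets.nu/img/"
--     races = {
--         "The Feds": 1,
--         "The Lizards": 2,
--         "The Bird Men": 3,
--         "The Fascists": 4,
--         "The Privateers": 5,
--         "The Cyborg": 6,
--         "The Crystals": 7,
--         "The Evil Empire": 8,
--         "The Robots": 9,
--         "The Rebels": 10,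
--         "The Colonies": 11,
--         "The Horwasp": 12,
--     }
--
--     if name.endswith(")"):
--         i = name.rfind("(")
--         if i != -1:
--             race_id = races.get(name[i + 1:-1])
--             if race_id is not None:
--                 return f"{base_url}races/race-{race_id}.jpg"
--
--     return f"{base_url}ui/league-logo-400-drop.png"
-- ===== Notes on version B (the rewrite author's own statement) =====
-- stated objective: simpler
-- what changed: B replaces the 12-iteration endswith scan over the races dict with one parse of the name (check for a trailing close-paren, rfind the last open-paren, slice out the text between them) followed by a single dict lookup.
import Mathlib
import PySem

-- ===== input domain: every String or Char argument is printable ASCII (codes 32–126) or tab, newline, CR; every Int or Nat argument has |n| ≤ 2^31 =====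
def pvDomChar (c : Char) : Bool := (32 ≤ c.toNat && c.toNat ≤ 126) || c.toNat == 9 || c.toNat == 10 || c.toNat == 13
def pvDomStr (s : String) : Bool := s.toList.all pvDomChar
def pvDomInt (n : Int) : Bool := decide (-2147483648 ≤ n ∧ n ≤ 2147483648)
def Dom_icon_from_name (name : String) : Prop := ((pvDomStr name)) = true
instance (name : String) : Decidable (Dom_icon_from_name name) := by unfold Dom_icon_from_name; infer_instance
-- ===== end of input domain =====

-- B replaces A's 12-iteration endswith scan with one parse of the final parenthesized
-- suffix (trailing ')' + rfind of the last '(') and a single dict lookup: simpler.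

-- the races dict literal (distinct keys), shared data of both ports
def pvRaces : PySem.Dict String Int := PySem.Dict.mk
  [("The Feds", 1), ("The Lizards", 2), ("The Bird Men", 3), ("The Fascists", 4),
   ("The Privateers", 5), ("The Cyborg", 6), ("The Crystals", 7), ("The Evil Empire", 8),
   ("The Robots", 9), ("The Rebels", 10), ("The Colonies", 11), ("The Horwasp", 12)]

-- ===== PORT A =====
-- the `for race_name, race_id in races.items()` loop with its early return
def pvScanRaces : List (String × Int) → String → Option String
  | [], _ => none
  | (race_name, race_id) :: rest, name =>
      if PySem.Str.endswith name ("(" ++ race_name ++ ")") then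
        some ("https://mobile.planets.nu/img/" ++ "races/race-" ++ PySem.Int.toStr race_id ++ ".jpg")
      else pvScanRaces rest name

def icon_from_name (name : String) : String :=
  match pvScanRaces pvRaces.items name with
  | some url => url
  | none => "https://mobile.planets.nu/img/" ++ "ui/league-logo-400-drop.png"

-- ===== PORT B =====
def icon_from_name_alt (name : String) : String :=
  if PySem.Str.endswith name ")" then
    let i := PySem.Str.rfind name "("
    if i ≠ -1 then
      match PySem.Dict.get? pvRaces (PySem.Str.slice name (some (i + 1)) (some (-1))) with
      | some race_id => "https://mobile.planets.nu/img/" ++ "races/race-" ++ PySem.Int.toStr race_id ++ ".jpg"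
      | none => "https://mobile.planets.nu/img/" ++ "ui/league-logo-400-drop.png"
    else "https://mobile.planets.nu/img/" ++ "ui/league-logo-400-drop.png"
  else "https://mobile.planets.nu/img/" ++ "ui/league-logo-400-drop.png"

-- ===== PRECONDITION & SPEC =====
def Spec_icon_from_name (name : String) (out : String) : Prop := out = icon_from_name_alt name
instance (name : String) (out : String) : Decidable (Spec_icon_from_name name out) := by unfold Spec_icon_from_name; infer_instance

-- ===== CLAIM (what is proved, stated in full; the proofs are below) =====
def Claim_equal_icon_from_name : Prop := ∀ (name : String), Dom_icon_from_name name → Spec_icon_from_name name (icon_from_name name)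

-- ===== LEMMAS AND PROOFS =====

lemma pv_isPrefixOf_singleton_iff (c : Char) (s : List Char) (j : ℕ) :
    [c].isPrefixOf (s.drop j) = true ↔ s[j]? = some c := by
  rw [← List.head?_drop]
  cases s.drop j with
  | nil => simp [List.isPrefixOf]
  | cons b bs =>
      simp [List.isPrefixOf]
      exact eq_comm

lemma pv_go_eq_neg_one (s : List Char) (c : Char) (n : ℕ)
    (h : ∀ j, j ≤ n → s[j]? ≠ some c) : PySem.Chars.rfind.go s [c] n = -1 := by
  induction n with
  | zero =>
      rw [PySem.Chars.rfind.go, if_neg]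
      intro hc
      exact h 0 le_rfl ((pv_isPrefixOf_singleton_iff c s 0).1 (by simpa using hc))
  | succ k ih =>
      rw [PySem.Chars.rfind.go, if_neg]
      · exact ih (fun j hj => h j (Nat.le_succ_of_le hj))
      · intro hc
        exact h (k + 1) le_rfl ((pv_isPrefixOf_singleton_iff c s (k + 1)).1 hc)

lemma pv_go_eq_of (s : List Char) (c : Char) (i n : ℕ)
    (hi : s[i]? = some c) (hin : i ≤ n)
    (hmax : ∀ j, i < j → s[j]? ≠ some c) : PySem.Chars.rfind.go s [c] n = i := by
  induction n with
  | zero =>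
      have hi0 : i = 0 := Nat.le_zero.1 hin
      subst hi0
      have hp : [c].isPrefixOf s = true := by
        have := (pv_isPrefixOf_singleton_iff c s 0).2 (by simpa using hi)
        simpa using this
      rw [PySem.Chars.rfind.go, if_pos hp]
      simp
  | succ k ih =>
      by_cases hik : i = k + 1
      · subst hik
        rw [PySem.Chars.rfind.go, if_pos ((pv_isPrefixOf_singleton_iff c s (k + 1)).2 hi)]
      · have hik' : i ≤ k := by omega
        rw [PySem.Chars.rfind.go, if_neg]
        · exact ih hik'
        · intro hc
          exact hmax (k + 1) (by omega) ((pv_isPrefixOf_singleton_iff c s (k + 1)).1 hc)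

lemma pv_rfind_no_mem (s : List Char) (c : Char) (h : c ∉ s) :
    PySem.Chars.rfind s [c] = -1 := by
  apply pv_go_eq_neg_one
  intro j _ hj
  exact h (List.mem_of_getElem? hj)

lemma pv_rfind_last (M R : List Char) (c : Char) (h : c ∉ R) :
    PySem.Chars.rfind (M ++ c :: R) [c] = M.length := by
  apply pv_go_eq_of
  · rw [List.getElem?_append_right le_rfl]
    simp
  · simp
  · intro j hj hc
    obtain ⟨m, rfl⟩ : ∃ m, j = M.length + (m + 1) := ⟨j - M.length - 1, by omega⟩
    rw [List.getElem?_append_right (by omega)] at hc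
    have : (c :: R)[m + 1]? = some c := by
      simpa [Nat.add_sub_cancel_left] using hc
    simp only [List.getElem?_cons_succ] at this
    exact h (List.mem_of_getElem? this)

lemma pv_exists_last_split (c : Char) (L : List Char) (h : c ∈ L) :
    ∃ M R, L = M ++ c :: R ∧ c ∉ R := by
  induction L with
  | nil => simp at h
  | cons a L' ih =>
      by_cases hm : c ∈ L'
      · obtain ⟨M, R, hMR, hR⟩ := ih hm
        exact ⟨a :: M, R, by simp [hMR], hR⟩
      · have : c = a := by
          rcases List.mem_cons.1 h with h | h
          · exact h
          · exact absurd h hm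
        exact ⟨[], L', by simp [this], hm⟩

lemma pv_last_split_unique (c : Char) (M₁ : List Char) :
    ∀ (M₂ R₁ R₂ : List Char), M₁ ++ c :: R₁ = M₂ ++ c :: R₂ → c ∉ R₁ → c ∉ R₂ →
      M₁ = M₂ ∧ R₁ = R₂ := by
  induction M₁ with
  | nil =>
      intro M₂ R₁ R₂ h h1 h2
      cases M₂ with
      | nil => simpa using h
      | cons b M₂' =>
          simp only [List.nil_append, List.cons_append, List.cons.injEq] at h
          exact absurd (h.2 ▸ List.mem_append_right M₂' (List.mem_cons_self)) h1
  | cons a M₁' ih =>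
      intro M₂ R₁ R₂ h h1 h2
      cases M₂ with
      | nil =>
          simp only [List.nil_append, List.cons_append, List.cons.injEq] at h
          exact absurd (h.2.symm ▸ List.mem_append_right M₁' (List.mem_cons_self)) h2
      | cons b M₂' =>
          simp only [List.cons_append, List.cons.injEq] at h
          obtain ⟨h1', h2'⟩ := ih M₂' R₁ R₂ h.2 h1 h2
          exact ⟨by rw [h.1, h1'], h2'⟩

lemma pv_match_iff (M key r : List Char) (hr : '(' ∉ r) (hkey : '(' ∉ key) :
    (('(' :: (r ++ [')'])) <:+ (M ++ '(' :: (key ++ [')']))) ↔ r = key := by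
  constructor
  · rintro ⟨P, hP⟩
    have h := pv_last_split_unique '(' P M (r ++ [')']) (key ++ [')']) hP
      (by simp [hr]) (by simp [hkey])
    exact List.append_cancel_right h.2
  · rintro rfl
    exact ⟨M, rfl⟩

lemma pv_pattern_toList (rn : String) :
    ("(" ++ rn ++ ")").toList = '(' :: (rn.toList ++ [')']) := by
  simp [String.toList_append]

lemma pv_slice_key (M R : List Char) (c : Char) :
    PySem.List.slice (M ++ c :: R) (some ((M.length : ℤ) + 1)) (some (-1)) = R.dropLast := by
  have h1 : ((M.length : ℤ) + 1) = ((M.length + 1 : ℕ) : ℤ) := by push_cast; ring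
  rw [h1]
  simp only [PySem.List.slice, PySem.List.clampIdx_natCast, PySem.List.clampIdx_neg_one]
  have hlen : (M ++ c :: R).length = M.length + R.length + 1 := by simp; omega
  rw [hlen]
  have h2 : min (M.length + 1) (M.length + R.length + 1) = M.length + 1 := by omega
  rw [h2]
  have h3 : M.length + R.length + 1 - 1 - (M.length + 1) = R.length - 1 := by omega
  rw [h3]
  have h4 : M.length + 1 = M.length + 1 := rfl
  rw [show M ++ c :: R = (M ++ [c]) ++ R by simp, show M.length + 1 = (M ++ [c]).length by simp,
    List.drop_left, List.dropLast_eq_take]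

lemma pv_scan_none_no_close (name : String) (h : ¬ ([')'] <:+ name.toList)) :
    ∀ rs, pvScanRaces rs name = none := by
  intro rs
  induction rs with
  | nil => rfl
  | cons p rest ih =>
      obtain ⟨rn, rid⟩ := p
      rw [pvScanRaces, if_neg, ih]
      intro hc
      rw [PySem.Str.endswith_eq, pv_pattern_toList] at hc
      obtain ⟨P, hP⟩ := (PySem.Chars.endswith_iff _ _).1 hc
      exact h ⟨P ++ '(' :: rn.toList, by simpa using hP⟩

lemma pv_scan_none_no_open (name : String) (h : '(' ∉ name.toList) :
    ∀ rs, pvScanRaces rs name = none := by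
  intro rs
  induction rs with
  | nil => rfl
  | cons p rest ih =>
      obtain ⟨rn, rid⟩ := p
      rw [pvScanRaces, if_neg, ih]
      intro hc
      rw [PySem.Str.endswith_eq, pv_pattern_toList] at hc
      exact h (((PySem.Chars.endswith_iff _ _).1 hc).subset (List.mem_cons_self))

lemma pv_scan_eq (name keyStr : String) (M : List Char)
    (hdec : name.toList = M ++ '(' :: (keyStr.toList ++ [')']))
    (hkey : '(' ∉ keyStr.toList) :
    ∀ rs : List (String × Int), (∀ p ∈ rs, '(' ∉ p.1.toList) →
      pvScanRaces rs name = (List.find? (fun p => p.1 == keyStr) rs).map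
        (fun p => "https://mobile.planets.nu/img/" ++ "races/race-" ++ PySem.Int.toStr p.2 ++ ".jpg") := by
  intro rs hrs
  induction rs with
  | nil => rfl
  | cons p rest ih =>
      obtain ⟨rn, rid⟩ := p
      have hcond : (PySem.Str.endswith name ("(" ++ rn ++ ")") = true) ↔ rn = keyStr := by
        rw [PySem.Str.endswith_eq, pv_pattern_toList, PySem.Chars.endswith_iff, hdec,
          pv_match_iff _ _ _ (hrs (rn, rid) List.mem_cons_self) hkey]
        constructor
        · intro h; exact String.ext h
        · intro h; rw [h]
      rw [pvScanRaces, List.find?]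
      by_cases h : rn = keyStr
      · rw [if_pos (hcond.2 h)]
        have : ((rn, rid).1 == keyStr) = true := by simpa using h
        rw [this]
        rfl
      · rw [if_neg (fun hc => h (hcond.1 hc))]
        have : ((rn, rid).1 == keyStr) = false := by simpa using h
        rw [this]
        exact ih (fun q hq => hrs q (List.mem_cons_of_mem _ hq))

lemma pv_races_no_open : ∀ p ∈ pvRaces.items, '(' ∉ p.1.toList := by decide

-- ===== VERDICT (by name: the statement is the Claim_ definition above) =====
theorem icon_from_name_spec : Claim_equal_icon_from_name := by
  intro name _
  unfold Spec_icon_from_name icon_from_name icon_from_name_alt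
  by_cases hend : PySem.Str.endswith name ")" = true
  · have hsuf : [')'] <:+ name.toList := by
      rw [PySem.Str.endswith_eq] at hend
      exact (PySem.Chars.endswith_iff _ _).1 hend
    by_cases hpo : '(' ∈ name.toList
    · obtain ⟨M, R, hdec, hR⟩ := pv_exists_last_split '(' name.toList hpo
      have hRne : R ≠ [] := by
        intro hnil
        subst hnil
        obtain ⟨t, ht⟩ := hsuf
        have : (M ++ ['(']).getLast? = (t ++ [')']).getLast? := by rw [← hdec, ht]
        simp at this
      have hRcat : R = R.dropLast ++ [R.getLast hRne] := (List.dropLast_append_getLast hRne).symm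
      have hlast : R.getLast hRne = ')' := by
        obtain ⟨t, ht⟩ := hsuf
        have h0 := ht.symm
        rw [hdec] at h0
        have h2 : (M ++ '(' :: R.dropLast) ++ [R.getLast hRne] = t ++ [')'] := by
          simp only [List.append_assoc, List.cons_append]
          rw [← hRcat]
          exact h0
        have h3 := (List.append_inj' h2 (by simp)).2
        simpa using h3
      have hRdec : R = R.dropLast ++ [')'] := by rw [← hlast]; exact hRcat
      have hdec' : name.toList = M ++ '(' :: (R.dropLast ++ [')']) := by rw [hdec, ← hRdec]
      have hkeyne : '(' ∉ R.dropLast := fun hc => hR ((List.dropLast_sublist R).subset hc)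
      -- rfind value
      have hrf : PySem.Str.rfind name "(" = (M.length : ℤ) := by
        rw [PySem.Str.rfind_eq, show ("(" : String).toList = ['('] from rfl, hdec]
        exact pv_rfind_last M R '(' hR
      rw [if_pos hend]
      simp only [hrf]
      rw [if_pos (by omega : (M.length : ℤ) ≠ -1)]
      -- the sliced key
      set keyStr := PySem.Str.slice name (some ((M.length : ℤ) + 1)) (some (-1)) with hkeyStr
      have hkeyList : keyStr.toList = R.dropLast := by
        rw [hkeyStr, PySem.Str.toList_slice, PySem.Chars.slice_eq_listSlice, hdec, pv_slice_key]
      have hdec'' : name.toList = M ++ '(' :: (keyStr.toList ++ [')']) := by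
        rw [hkeyList]; exact hdec'
      rw [pv_scan_eq name keyStr M hdec'' (hkeyList ▸ hkeyne) pvRaces.items pv_races_no_open]
      rw [PySem.Dict.get?]
      cases hf : List.find? (fun p => p.1 == keyStr) pvRaces.items with
      | none => rfl
      | some p => rfl
    · rw [pv_scan_none_no_open name hpo, if_pos hend]
      have hrf : PySem.Str.rfind name "(" = -1 := by
        rw [PySem.Str.rfind_eq, show ("(" : String).toList = ['('] from rfl]
        exact pv_rfind_no_mem _ _ hpo
      simp only [hrf]
      rw [if_neg (by simp : ¬ (-1 : ℤ) ≠ -1)]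
  · have hsuf : ¬ ([')'] <:+ name.toList) := by
      intro hc
      exact hend (by rw [PySem.Str.endswith_eq]; exact (PySem.Chars.endswith_iff _ _).2 hc)
    rw [pv_scan_none_no_close name hsuf, if_neg hend]
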